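-- pv_equiv track=rewrite | github.com/AriannaBi/Algorithms-Data-Structures | exercise/197.py | Binary_Search_2D
-- ===== SOURCE A (Python) =====
-- def Binary_Search_2D(A, x, y):
--     A.sort()
--     first = 0
--     last = len(A) - 1
--     while first <= last:
--         middle = (first + last) // 2
--         if A[middle][0] < x:
--             first = middle + 1
--         elif A[middle][0] > x:
--             last = middle - 1
--         elif first == last and A[first][0] == x and A[first][1] == y:
--             return True
--         elif first == last:
--             return False
--         elif A[middle][1] < y:
--             first = middle + 1
--         elif A[middle][1] > y:
--             last = middle - 1
--         else:
--             return True
--     return False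
-- ===== SOURCE B (Python) =====
-- def Binary_Search_2D(A, x, y):
--     # A.sort() kept only for A's observable in-place side effect on the argument
--     A.sort()
--     return any(a[0] == x and a[1] == y for a in A)
-- ===== Notes on version B (the rewrite author's own statement) =====
-- stated objective: simpler
-- what changed: Replaces A's lexicographic binary search over the sorted list with a single linear scan (any(a[0]==x and a[1]==y for a in A)); the in-place A.sort() is kept only for its observable side effect on the argument.
-- outside the precondition, e.g. on Binary_Search_2D([[], [1, 1], [2, 2]], 2, 2): A returns True, B raises IndexError; on Binary_Search_2D([[3], [3, 5], [4, 4], [4, 4]], 3, 9): A returns False, B raises IndexError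
import Mathlib
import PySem

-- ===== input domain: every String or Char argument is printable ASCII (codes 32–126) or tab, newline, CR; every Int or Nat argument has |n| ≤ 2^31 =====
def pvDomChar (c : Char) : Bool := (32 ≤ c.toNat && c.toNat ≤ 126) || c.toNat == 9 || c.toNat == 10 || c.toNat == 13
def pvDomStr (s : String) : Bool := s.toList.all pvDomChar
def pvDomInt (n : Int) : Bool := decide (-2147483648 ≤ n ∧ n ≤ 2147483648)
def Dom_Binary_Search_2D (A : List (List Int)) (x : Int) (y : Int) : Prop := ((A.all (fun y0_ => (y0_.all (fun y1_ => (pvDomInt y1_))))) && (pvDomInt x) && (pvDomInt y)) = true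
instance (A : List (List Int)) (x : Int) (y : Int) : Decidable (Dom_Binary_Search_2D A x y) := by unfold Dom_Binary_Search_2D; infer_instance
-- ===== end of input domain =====

-- B replaces A's lexicographic binary search with a single linear scan over the same
-- (in-place) sorted list; equivalence is about the return value (both sort A in place).

-- ===== PORT A =====
-- the while-loop of A, step for step (first/last/middle exactly as in the Python);
-- fuel only makes the recursion structural: the range shrinks each iteration, so with
-- fuel = len(A)+1 the 0-case is never reached (bsLoop_iff below is proved for any
-- sufficient fuel)
def bsLoop (S : List (List Int)) (x y : Int) : Nat → Int → Int → Bool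
  | 0, _, _ => false
  | fuel + 1, first, last =>
    if first ≤ last then
      -- middle = (first + last) // 2 (written inline at each use; same value each iteration)
      if PySem.List.pyGetD (PySem.List.pyGetD S (PySem.Int.floordiv (first + last) 2) []) 0 0 < x then
        bsLoop S x y fuel (PySem.Int.floordiv (first + last) 2 + 1) last
      else if PySem.List.pyGetD (PySem.List.pyGetD S (PySem.Int.floordiv (first + last) 2) []) 0 0 > x then
        bsLoop S x y fuel first (PySem.Int.floordiv (first + last) 2 - 1)
      else if first = last ∧ PySem.List.pyGetD (PySem.List.pyGetD S first []) 0 0 = x ∧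
                PySem.List.pyGetD (PySem.List.pyGetD S first []) 1 0 = y then true
      else if first = last then false
      else if PySem.List.pyGetD (PySem.List.pyGetD S (PySem.Int.floordiv (first + last) 2) []) 1 0 < y then
        bsLoop S x y fuel (PySem.Int.floordiv (first + last) 2 + 1) last
      else if PySem.List.pyGetD (PySem.List.pyGetD S (PySem.Int.floordiv (first + last) 2) []) 1 0 > y then
        bsLoop S x y fuel first (PySem.Int.floordiv (first + last) 2 - 1)
      else true
    else false

def Binary_Search_2D (A : List (List Int)) (x : Int) (y : Int) : Bool :=
  let As := PySem.List.sorted A (fun a => a) false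
  bsLoop As x y (As.length + 1) 0 ((As.length : Int) - 1)

-- ===== PORT B =====
def Binary_Search_2D_alt (A : List (List Int)) (x : Int) (y : Int) : Bool :=
  let As := PySem.List.sorted A (fun a => a) false
  As.any (fun a => (PySem.List.pyGetD a 0 0 == x) && (PySem.List.pyGetD a 1 0 == y))

-- ===== PRECONDITION & SPEC =====
-- Pre_ excludes inputs containing an empty inner list or a one-element inner list whose
-- only entry equals x: on those A raises IndexError on some and returns an ordinary value
-- on others depending on the search path, while B's scan raises IndexError on them.
def Pre_Binary_Search_2D (A : List (List Int)) (x : Int) (y : Int) : Prop :=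
  ∀ a ∈ A, 2 ≤ a.length ∨ (a.length = 1 ∧ a.getD 0 0 ≠ x)
instance (A : List (List Int)) (x : Int) (y : Int) : Decidable (Pre_Binary_Search_2D A x y) := by
  unfold Pre_Binary_Search_2D; infer_instance

def pvWitness_Binary_Search_2D : List (List Int) × Int × Int := ([[1, 2], [3, 4], [5]], 1, 2)

def Spec_Binary_Search_2D (A : List (List Int)) (x : Int) (y : Int) (out : Bool) : Prop := out = Binary_Search_2D_alt A x y
instance (A : List (List Int)) (x : Int) (y : Int) (out : Bool) : Decidable (Spec_Binary_Search_2D A x y out) := by unfold Spec_Binary_Search_2D; infer_instance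

-- ===== CLAIM (what is proved, stated in full; the proofs are below) =====
def Claim_equal_Binary_Search_2D : Prop := ∀ (A : List (List Int)) (x : Int) (y : Int), Dom_Binary_Search_2D A x y → Pre_Binary_Search_2D A x y → Spec_Binary_Search_2D A x y (Binary_Search_2D A x y)

-- ===== LEMMAS AND PROOFS =====

-- a[0] / a[1] with default agree with List.getD (index nonnegative, default 0 on both sides)
theorem pvGetD_zero' (a : List Int) : PySem.List.pyGetD a 0 0 = a.getD 0 0 :=
  PySem.List.pyGetD_zero a 0

theorem pvGetD_one (a : List Int) : PySem.List.pyGetD a 1 0 = a.getD 1 0 :=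
  PySem.List.pyGetD_ofNat' a 1 0

theorem pvGetDS (S : List (List Int)) (i : Int) (h0 : 0 ≤ i) (h1 : i < (S.length : Int)) :
    PySem.List.pyGetD S i [] = S.getD i.toNat [] := by
  rw [PySem.List.pyGetD_eq_getElem S [] h0 h1]
  exact (List.getD_eq_getElem S [] (by omega)).symm

theorem pvGetDNat (S : List (List Int)) (i : Nat) (hi : i < S.length) :
    S.getD i [] = S[i] :=
  List.getD_eq_getElem S [] hi

-- lexicographic ≤ on List Int, one cons step
theorem pvCons_le_iff (a b : Int) (l m : List Int) :
    ((a :: l) ≤ (b :: m)) ↔ (a < b ∨ (a = b ∧ l ≤ m)) := by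
  rw [← not_lt, List.cons_lt_cons_iff, ← not_lt (a := m) (b := l)]
  constructor
  · intro h
    rcases lt_trichotomy a b with h1 | h1 | h1
    · exact Or.inl h1
    · exact Or.inr ⟨h1, fun hlt => h (Or.inr ⟨h1.symm, hlt⟩)⟩
    · exact absurd (Or.inl h1) h
  · rintro (h | ⟨rfl, h⟩) (h2 | ⟨h2, h3⟩)
    · omega
    · omega
    · omega
    · exact h h3

theorem pvHead_mono (a b : List Int) (ha : 1 ≤ a.length) (hb : 1 ≤ b.length) (h : a ≤ b) :
    a.getD 0 0 ≤ b.getD 0 0 := by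
  match a, b with
  | a0 :: l, b0 :: m =>
    rw [pvCons_le_iff] at h
    rcases h with h | ⟨rfl, h⟩
    · exact le_of_lt h
    · exact le_refl _

theorem pvSecond_mono (a b : List Int) (ha : 2 ≤ a.length) (hb : 2 ≤ b.length) (h : a ≤ b)
    (hh : a.getD 0 0 = b.getD 0 0) : a.getD 1 0 ≤ b.getD 1 0 := by
  match a, b with
  | a0 :: a1 :: l, b0 :: b1 :: m =>
    simp only [List.getD] at hh ⊢
    rw [pvCons_le_iff] at h
    rcases h with h | ⟨rfl, h⟩
    · exact absurd hh (by simpa using ne_of_lt h)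
    · rw [pvCons_le_iff] at h
      rcases h with h | ⟨rfl, h⟩
      · simpa using le_of_lt h
      · simp

theorem pvInsertBy_nil (b : List Int → List Int → Bool) (x : List Int) :
    PySem.List.insertBy b x [] = [x] := rfl

theorem pvInsertBy_cons (b : List Int → List Int → Bool) (x y : List Int) (ys : List (List Int)) :
    PySem.List.insertBy b x (y :: ys)
      = if b x y then x :: y :: ys else y :: PySem.List.insertBy b x ys := rfl

theorem pvInsertBy_pairwise (x : List Int) (ys : List (List Int))
    (hys : ys.Pairwise (· ≤ ·)) :
    (PySem.List.insertBy (fun a b => decide (a < b)) x ys).Pairwise (· ≤ ·) := by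
  induction ys with
  | nil => simp [pvInsertBy_nil]
  | cons y ys ih =>
    rw [pvInsertBy_cons]
    cases hys with
    | cons hy hys' =>
      by_cases hxy : x < y
      · rw [if_pos (by simpa using hxy)]
        refine List.Pairwise.cons ?_ (List.Pairwise.cons hy hys')
        intro z hz
        rcases List.mem_cons.mp hz with rfl | hz
        · exact le_of_lt hxy
        · exact le_trans (le_of_lt hxy) (hy z hz)
      · rw [if_neg (by simpa using hxy)]
        refine List.Pairwise.cons ?_ (ih hys')
        intro z hz
        rcases (PySem.List.mem_insertBy _ x z ys).mp hz with rfl | hz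
        · exact not_lt.mp hxy
        · exact hy z hz

theorem pvFoldl_pairwise (A : List (List Int)) :
    ∀ acc : List (List Int), acc.Pairwise (· ≤ ·) →
      (A.foldl (fun acc x => PySem.List.insertBy (fun a b => decide (a < b)) x acc) acc).Pairwise
        (· ≤ ·) := by
  induction A with
  | nil => intro acc h; exact h
  | cons a A ih =>
    intro acc h
    exact ih _ (pvInsertBy_pairwise a acc h)

theorem pvSorted_pairwise (A : List (List Int)) :
    (PySem.List.sorted A (fun a => a) false).Pairwise (· ≤ ·) := by
  rw [PySem.List.sorted_eq_foldl_insertBy]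
  exact pvFoldl_pairwise A [] List.Pairwise.nil

theorem pvSorted_getElem_mono (A : List (List Int)) (i j : Nat) (hij : i ≤ j)
    (hj : j < (PySem.List.sorted A (fun a => a) false).length) :
    (PySem.List.sorted A (fun a => a) false)[i]'(Nat.lt_of_le_of_lt hij hj)
      ≤ (PySem.List.sorted A (fun a => a) false)[j] := by
  rcases Nat.lt_or_ge i j with h | h
  · exact List.pairwise_iff_getElem.mp (pvSorted_pairwise A) i j _ _ h
  · have : i = j := by omega
    subst this
    exact le_refl _

-- the loop returns true iff some index in [first, last] matches (x, y) on its first two entries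
theorem bsLoop_iff (S : List (List Int)) (x y : Int)
    (mono1 : ∀ i j : Nat, i ≤ j → j < S.length →
      PySem.List.pyGetD (S.getD i []) 0 0 ≤ PySem.List.pyGetD (S.getD j []) 0 0)
    (mono2 : ∀ i j : Nat, i ≤ j → j < S.length →
      PySem.List.pyGetD (S.getD i []) 0 0 = x → PySem.List.pyGetD (S.getD j []) 0 0 = x →
      PySem.List.pyGetD (S.getD i []) 1 0 ≤ PySem.List.pyGetD (S.getD j []) 1 0)
    (n : Nat) : ∀ (first last : Int), (last + 1 - first).toNat < n → 0 ≤ first →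
      last < (S.length : Int) →
    (bsLoop S x y n first last = true ↔ ∃ i : Nat, first ≤ (i : Int) ∧ (i : Int) ≤ last ∧
      PySem.List.pyGetD (S.getD i []) 0 0 = x ∧ PySem.List.pyGetD (S.getD i []) 1 0 = y) := by
  induction n with
  | zero =>
    intro first last hn h0 h1
    exact absurd hn (Nat.not_lt_zero _)
  | succ n ih =>
    intro first last hn h0 h1
    by_cases hfl : first ≤ last
    · have hmb := PySem.Int.floordiv_two_mid_bounds hfl
      simp only [bsLoop]
      rw [if_pos hfl]
      set m := PySem.Int.floordiv (first + last) 2 with hmdef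
      obtain ⟨hm1, hm2⟩ := hmb
      rw [pvGetDS S m (by omega) (by omega), pvGetDS S first (by omega) (by omega)]
      split_ifs with c1 c2 c3 c4 c5 c6
      · rw [ih (m + 1) last (by omega) (by omega) h1]
        constructor
        · rintro ⟨i, hi1, hi2, hp⟩
          exact ⟨i, by omega, hi2, hp⟩
        · rintro ⟨i, hi1, hi2, hp0, hp1⟩
          refine ⟨i, ?_, hi2, hp0, hp1⟩
          by_contra hc
          have := mono1 i m.toNat (by omega) (by omega)
          omega
      · rw [ih first (m - 1) (by omega) h0 (by omega)]
        constructor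
        · rintro ⟨i, hi1, hi2, hp⟩
          exact ⟨i, hi1, by omega, hp⟩
        · rintro ⟨i, hi1, hi2, hp0, hp1⟩
          refine ⟨i, hi1, ?_, hp0, hp1⟩
          by_contra hc
          have := mono1 m.toNat i (by omega) (by omega)
          omega
      · obtain ⟨he, hp0, hp1⟩ := c3
        constructor
        · intro _
          exact ⟨first.toNat, by omega, by omega, hp0, hp1⟩
        · intro _
          rfl
      · simp only [Bool.false_eq_true, false_iff]
        rintro ⟨i, hi1, hi2, hp0, hp1⟩
        have hieq : i = first.toNat := by omega
        subst hieq
        exact c3 ⟨c4, hp0, hp1⟩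
      · rw [ih (m + 1) last (by omega) (by omega) h1]
        constructor
        · rintro ⟨i, hi1, hi2, hp⟩
          exact ⟨i, by omega, hi2, hp⟩
        · rintro ⟨i, hi1, hi2, hp0, hp1⟩
          refine ⟨i, ?_, hi2, hp0, hp1⟩
          by_contra hc
          have := mono2 i m.toNat (by omega) (by omega) hp0 (by omega)
          omega
      · rw [ih first (m - 1) (by omega) h0 (by omega)]
        constructor
        · rintro ⟨i, hi1, hi2, hp⟩
          exact ⟨i, hi1, by omega, hp⟩
        · rintro ⟨i, hi1, hi2, hp0, hp1⟩
          refine ⟨i, hi1, ?_, hp0, hp1⟩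
          by_contra hc
          have := mono2 m.toNat i (by omega) (by omega) (by omega) hp0
          omega
      · constructor
        · intro _
          exact ⟨m.toNat, by omega, by omega, by omega, by omega⟩
        · intro _
          rfl
    · simp only [bsLoop]
      rw [if_neg hfl]
      simp only [Bool.false_eq_true, false_iff]
      rintro ⟨i, hi1, hi2, _⟩
      omega

-- ===== VERDICT (by name: the statement is the Claim_ definition above) =====
theorem pvMain (S : List (List Int)) (x y : Int)
    (mono1 : ∀ i j : Nat, i ≤ j → j < S.length →
      PySem.List.pyGetD (S.getD i []) 0 0 ≤ PySem.List.pyGetD (S.getD j []) 0 0)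
    (mono2 : ∀ i j : Nat, i ≤ j → j < S.length →
      PySem.List.pyGetD (S.getD i []) 0 0 = x → PySem.List.pyGetD (S.getD j []) 0 0 = x →
      PySem.List.pyGetD (S.getD i []) 1 0 ≤ PySem.List.pyGetD (S.getD j []) 1 0) :
    bsLoop S x y (S.length + 1) 0 ((S.length : Int) - 1)
      = S.any (fun a => (PySem.List.pyGetD a 0 0 == x) && (PySem.List.pyGetD a 1 0 == y)) := by
  rw [Bool.eq_iff_iff,
    bsLoop_iff S x y mono1 mono2 (S.length + 1) 0 ((S.length : Int) - 1)
      (by omega) le_rfl (by omega),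
    List.any_eq_true]
  constructor
  · rintro ⟨i, hi0, hi1, hp0, hp1⟩
    have hi : i < S.length := by omega
    refine ⟨S[i], List.getElem_mem hi, ?_⟩
    rw [pvGetDNat S i hi] at hp0 hp1
    simp [hp0, hp1]
  · rintro ⟨a, ha, hfa⟩
    obtain ⟨i, hi, rfl⟩ := List.mem_iff_getElem.mp ha
    simp only [Bool.and_eq_true, beq_iff_eq] at hfa
    exact ⟨i, by omega, by omega,
      by rw [pvGetDNat S i hi]; exact hfa.1,
      by rw [pvGetDNat S i hi]; exact hfa.2⟩

theorem Binary_Search_2D_spec : Claim_equal_Binary_Search_2D := by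
  intro A x y _ hpre
  unfold Spec_Binary_Search_2D Binary_Search_2D Binary_Search_2D_alt
  show bsLoop (PySem.List.sorted A (fun a => a) false) x y
        ((PySem.List.sorted A (fun a => a) false).length + 1) 0
        (((PySem.List.sorted A (fun a => a) false).length : Int) - 1)
      = (PySem.List.sorted A (fun a => a) false).any
          (fun a => (PySem.List.pyGetD a 0 0 == x) && (PySem.List.pyGetD a 1 0 == y))
  have hpre' : ∀ a ∈ PySem.List.sorted A (fun a => a) false,
      2 ≤ a.length ∨ (a.length = 1 ∧ a.getD 0 0 ≠ x) := by
    intro a ha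
    exact hpre a ((PySem.List.mem_sorted A (fun a => a) false a).mp ha)
  have hlen1 : ∀ a ∈ PySem.List.sorted A (fun a => a) false, 1 ≤ a.length := by
    intro a ha
    rcases hpre' a ha with h | h <;> omega
  have hlen2 : ∀ a ∈ PySem.List.sorted A (fun a => a) false, a.getD 0 0 = x → 2 ≤ a.length := by
    intro a ha hax
    rcases hpre' a ha with h | h
    · exact h
    · exact absurd hax h.2
  refine pvMain _ x y ?_ ?_
  · intro i j hij hj
    have hi : i < (PySem.List.sorted A (fun a => a) false).length := Nat.lt_of_le_of_lt hij hj
    rw [pvGetD_zero', pvGetD_zero', pvGetDNat _ i hi, pvGetDNat _ j hj]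
    exact pvHead_mono _ _ (hlen1 _ (List.getElem_mem hi)) (hlen1 _ (List.getElem_mem hj))
      (pvSorted_getElem_mono A i j hij hj)
  · intro i j hij hj h0i h0j
    have hi : i < (PySem.List.sorted A (fun a => a) false).length := Nat.lt_of_le_of_lt hij hj
    rw [pvGetD_zero', pvGetDNat _ i hi] at h0i
    rw [pvGetD_zero', pvGetDNat _ j hj] at h0j
    rw [pvGetD_one, pvGetD_one, pvGetDNat _ i hi, pvGetDNat _ j hj]
    exact pvSecond_mono _ _ (hlen2 _ (List.getElem_mem hi) h0i)
      (hlen2 _ (List.getElem_mem hj) h0j)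
      (pvSorted_getElem_mono A i j hij hj) (h0i.trans h0j.symm)
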